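-- pv_equiv track=rewrite | github.com/MrBrantCode/unitest_baseline | mut_generate/mist_train_taco/taco_12220/solution.py | find_nth_prime_in_sequence
-- ===== SOURCE A (Python) =====
-- def find_nth_prime_in_sequence(a: int, d: int, n: int) -> int:
--     """
--     Finds the nth prime number in the arithmetic sequence starting with 'a' and increasing by 'd'.
--
--     Parameters:
--     a (int): The starting number of the arithmetic sequence.
--     d (int): The difference between consecutive numbers in the sequence.
--     n (int): The position of the prime number to find in the sequence.
--
--     Returns:
--     int: The nth prime number in the arithmetic sequence.
--     """
--     MAXN = 10 ** 6
--     sieve = [0] * 2 + [1] * MAXN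
--     n_idx = 2
--
--     # Generate the sieve of Eratosthenes
--     while n_idx * n_idx <= MAXN:
--         if sieve[n_idx]:
--             for i in range(2 * n_idx, MAXN + 1, n_idx):
--                 sieve[i] = 0
--         n_idx += 1
--
--     # Find the nth prime in the arithmetic sequence
--     cnt = 0
--     for i in range(a, MAXN + 1, d):
--         if sieve[i]:
--             cnt += 1
--             if cnt == n:
--                 return i
--
--     # If no prime is found (which shouldn't happen given the problem constraints), return -1
--     return -1
-- ===== SOURCE B (Python) =====
-- def _is_prime(x: int) -> bool:
--     if x < 2:
--         return False
--     j = 2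
--     while j * j <= x:
--         if x % j == 0:
--             return False
--         j += 1
--     return True
--
--
-- def find_nth_prime_in_sequence(a: int, d: int, n: int) -> int:
--     MAXN = 10 ** 6
--     cnt = 0
--     for i in range(a, MAXN + 1, d):
--         if _is_prime(i):
--             cnt += 1
--             if cnt == n:
--                 return i
--     return -1
-- ===== Notes on version B (the rewrite author's own statement) =====
-- stated objective: faster
-- what changed: B drops the fixed 10^6 Sieve of Eratosthenes built on every call and instead tests each sequence term directly by trial division up to its square root, stopping at the nth prime.
-- outside the precondition, e.g. on find_nth_prime_in_sequence(-10, 3, 1): A returns -1, B returns 2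
import Mathlib
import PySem

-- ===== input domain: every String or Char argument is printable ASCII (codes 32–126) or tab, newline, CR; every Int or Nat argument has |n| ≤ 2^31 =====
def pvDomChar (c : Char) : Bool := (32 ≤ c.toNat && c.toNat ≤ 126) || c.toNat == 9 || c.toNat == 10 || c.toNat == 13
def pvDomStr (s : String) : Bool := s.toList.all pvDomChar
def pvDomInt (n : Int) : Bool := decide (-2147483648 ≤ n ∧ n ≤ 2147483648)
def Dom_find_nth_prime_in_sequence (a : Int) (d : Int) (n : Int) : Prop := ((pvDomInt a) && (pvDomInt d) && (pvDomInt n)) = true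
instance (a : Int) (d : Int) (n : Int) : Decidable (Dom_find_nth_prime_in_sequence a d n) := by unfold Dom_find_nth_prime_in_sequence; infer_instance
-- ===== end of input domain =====

-- B replaces A's fixed 10^6 Sieve of Eratosthenes (rebuilt on every call) by trial division
-- of each sequence term up to its square root, stopping at the nth prime.

-- ===== PORT A =====

-- Python `sieve[i]` (read): a negative index wraps to the top; an out-of-range read raises
-- IndexError in Python (excluded by Pre_), here it yields the default 0.
def pvAGet (arr : Array Int) (i : Int) : Int :=
  if i < 0 then arr.getD (i + arr.size).toNat 0 else arr.getD i.toNat 0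

-- Python `sieve[i] = v`: A only ever writes indices 2*n_idx … MAXN, always in range.
def pvASet (arr : Array Int) (i : Int) (v : Int) : Array Int :=
  if 0 ≤ i then arr.set! i.toNat v else arr

-- sieve = [0] * 2 + [1] * MAXN
def pvSieveInit : Array Int := Array.replicate 2 0 ++ Array.replicate 1000000 1

-- while n_idx * n_idx <= MAXN: if sieve[n_idx]: for i in range(2*n_idx, MAXN+1, n_idx): sieve[i] = 0
def pvSieveLoop (arr : Array Int) (m : Nat) : Array Int :=
  if m * m ≤ 1000000 then
    pvSieveLoop
      (if pvAGet arr (m : Int) = 1 then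
        (PySem.List.pyRange (2 * (m : Int)) 1000001 (m : Int)).foldl (fun s i => pvASet s i 0) arr
       else arr) (m + 1)
  else arr
termination_by 1001 - m
decreasing_by
  rename_i h
  have : m ≤ 1000 := by nlinarith
  omega

-- cnt = 0; for i in range(a, MAXN+1, d): if sieve[i]: cnt += 1; if cnt == n: return i / return -1
def pvCountA (sieve : Array Int) (l : List Int) (cnt n : Int) : Int :=
  match l with
  | [] => -1
  | i :: rest =>
    if pvAGet sieve i = 1 then
      if cnt + 1 = n then i else pvCountA sieve rest (cnt + 1) n
    else pvCountA sieve rest cnt n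

def find_nth_prime_in_sequence (a : Int) (d : Int) (n : Int) : Int :=
  pvCountA (pvSieveLoop pvSieveInit 2) (PySem.List.pyRange a 1000001 d) 0 n

-- ===== PORT B =====

-- j = 2; while j*j <= x: if x % j == 0: return False; j += 1; return True
-- (called with x ≥ 2, so Nat arithmetic coincides with Python's int arithmetic)
def pvIsPrimeAux (x : Nat) (j : Nat) : Bool :=
  if j * j ≤ x then (if x % j = 0 then false else pvIsPrimeAux x (j + 1)) else true
termination_by x + 2 - j
decreasing_by
  rename_i h _
  rcases Nat.lt_or_ge j 2 with h2 | h2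
  · omega
  · have : j ≤ j * j := Nat.le_mul_of_pos_left _ (by omega)
    omega

-- _is_prime(x): if x < 2: return False, then trial division
def pvIsPrime (x : Int) : Bool := if x < 2 then false else pvIsPrimeAux x.toNat 2

-- cnt = 0; for i in range(a, MAXN+1, d): if _is_prime(i): cnt += 1; if cnt == n: return i / return -1
def pvCountB (l : List Int) (cnt n : Int) : Int :=
  match l with
  | [] => -1
  | i :: rest =>
    if pvIsPrime i then
      if cnt + 1 = n then i else pvCountB rest (cnt + 1) n
    else pvCountB rest cnt n

def find_nth_prime_in_sequence_alt (a : Int) (d : Int) (n : Int) : Int :=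
  pvCountB (PySem.List.pyRange a 1000001 d) 0 n

-- ===== PRECONDITION & SPEC =====

-- Pre_ excludes d = 0 (A raises ValueError), a < -(10^6+2) with d ≥ 1 and a > 10^6+1 with
-- d ≤ -1 (A raises IndexError on the sieve lookup), and the remaining a < 0 with d ≥ 1, where
-- A's value is an artefact of Python negative-index wraparound into the sieve (e.g. sieve[-1]
-- is the never-cleared cell 10^6+1, so A(-10,3,1) = -1 while B returns the real prime 2).
def Pre_find_nth_prime_in_sequence (a : Int) (d : Int) (n : Int) : Prop :=
  (0 ≤ a ∧ 1 ≤ d) ∨ (d ≤ -1 ∧ a ≤ 1000001)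
instance (a : Int) (d : Int) (n : Int) : Decidable (Pre_find_nth_prime_in_sequence a d n) := by
  unfold Pre_find_nth_prime_in_sequence; infer_instance

def pvWitness_find_nth_prime_in_sequence : Int × Int × Int := (5, 2, 1)

def Spec_find_nth_prime_in_sequence (a : Int) (d : Int) (n : Int) (out : Int) : Prop := out = find_nth_prime_in_sequence_alt a d n
instance (a : Int) (d : Int) (n : Int) (out : Int) : Decidable (Spec_find_nth_prime_in_sequence a d n out) := by unfold Spec_find_nth_prime_in_sequence; infer_instance

-- ===== CLAIM (what is proved, stated in full; the proofs are below) =====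
def Claim_equal_find_nth_prime_in_sequence : Prop := ∀ (a : Int) (d : Int) (n : Int), Dom_find_nth_prime_in_sequence a d n → Pre_find_nth_prime_in_sequence a d n → Spec_find_nth_prime_in_sequence a d n (find_nth_prime_in_sequence a d n)


-- ===== LEMMAS AND PROOFS =====

-- i has survived sieving by all primes below m
def pvGood (m i : Nat) : Bool := decide (2 ≤ i ∧ ∀ p, p < m → p.Prime → p ∣ i → p = i)

lemma pvGood_iff (m i : Nat) :
    pvGood m i = true ↔ (2 ≤ i ∧ ∀ p, p < m → p.Prime → p ∣ i → p = i) := by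
  simp [pvGood]

lemma pvASet_size (arr : Array Int) (i v : Int) : (pvASet arr i v).size = arr.size := by
  simp [pvASet]; split <;> simp

lemma pvASet_getD (arr : Array Int) (i v : Int) (j : Nat) (hj : j < arr.size) :
    (pvASet arr i v).getD j 0 = if i = (j : Int) then v else arr.getD j 0 := by
  unfold pvASet
  split
  · rename_i h0
    rw [Array.set!]
    by_cases he : i = (j : Int)
    · have h1 : i.toNat = j := by omega
      simp [Array.getD_eq_getD_getElem?, he, hj]
    · have h1 : i.toNat ≠ j := by omega
      simp [Array.getD_eq_getD_getElem?, he, h1]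
      rw [Array.getElem?_eq_getElem hj]
      rfl
  · rename_i h0
    have : i ≠ (j : Int) := by omega
    simp [this]

lemma pvFold_size (l : List Int) (arr : Array Int) :
    (l.foldl (fun s i => pvASet s i 0) arr).size = arr.size := by
  induction l generalizing arr with
  | nil => rfl
  | cons x xs ih => simp [List.foldl, ih, pvASet_size]

lemma pvFold_getD (l : List Int) (arr : Array Int) (j : Nat) (hj : j < arr.size) :
    (l.foldl (fun s i => pvASet s i 0) arr).getD j 0 =
      if (j : Int) ∈ l then 0 else arr.getD j 0 := by
  induction l generalizing arr with
  | nil => simp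
  | cons x xs ih =>
    simp only [List.foldl]
    rw [ih _ (by rw [pvASet_size]; exact hj), pvASet_getD arr x 0 j hj]
    by_cases hx : (j : Int) ∈ xs <;> by_cases he : x = (j : Int) <;>
      simp [hx, he, eq_comm]

lemma pvAGet_natCast (arr : Array Int) (j : Nat) : pvAGet arr (j : Int) = arr.getD j 0 := by
  simp [pvAGet]

lemma pvGood_self_iff_prime (m : Nat) (hm : 2 ≤ m) : pvGood m m = true ↔ m.Prime := by
  rw [pvGood_iff]
  constructor
  · intro ⟨_, h⟩
    by_contra hnp
    have hpf := Nat.minFac_prime (by omega : m ≠ 1)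
    have hdvd := Nat.minFac_dvd m
    have hne : m.minFac ≠ m := fun he => hnp (Nat.prime_def_minFac.mpr ⟨hm, he⟩)
    have hlt : m.minFac < m := lt_of_le_of_ne (Nat.minFac_le (by omega)) hne
    exact hne (h m.minFac hlt hpf hdvd)
  · intro hp
    refine ⟨hm, fun p _ hpp hpd => ?_⟩
    rcases (Nat.Prime.eq_one_or_self_of_dvd hp p hpd) with h1 | h1
    · exact absurd h1 hpp.ne_one
    · exact h1

lemma pvGood_1001_iff_prime (i : Nat) (hi : i ≤ 1000000) : pvGood 1001 i = true ↔ i.Prime := by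
  rw [pvGood_iff]
  constructor
  · intro ⟨h2, h⟩
    by_contra hnp
    have hpf := Nat.minFac_prime (by omega : i ≠ 1)
    have hdvd := Nat.minFac_dvd i
    have hne : i.minFac ≠ i := fun he => hnp (Nat.prime_def_minFac.mpr ⟨h2, he⟩)
    have hsq : i.minFac ^ 2 ≤ i := Nat.minFac_sq_le_self (by omega) hnp
    have hlt : i.minFac < 1001 := by nlinarith [hsq]
    exact hne (h i.minFac hlt hpf hdvd)
  · intro hp
    refine ⟨hp.two_le, fun p _ hpp hpd => ?_⟩
    rcases (Nat.Prime.eq_one_or_self_of_dvd hp p hpd) with h1 | h1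
    · exact absurd h1 hpp.ne_one
    · exact h1

lemma pvMem_sieve_range (m : Nat) (hm : 2 ≤ m) (j : Nat) :
    ((j : Int) ∈ PySem.List.pyRange (2 * (m : Int)) 1000001 (m : Int)) ↔
      (m ∣ j ∧ 2 * m ≤ j ∧ j ≤ 1000000) := by
  rw [PySem.List.mem_pyRange_iff_of_pos (by exact_mod_cast (show 0 < m by omega))]
  constructor
  · rintro ⟨h1, h2, c, hc⟩
    have hd : (m : Int) ∣ (j : Int) := ⟨c + 2, by linarith⟩
    exact ⟨by exact_mod_cast hd, by exact_mod_cast h1, by omega⟩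
  · rintro ⟨hd, h1, h2⟩
    have hd' : (m : Int) ∣ (j : Int) := by exact_mod_cast hd
    obtain ⟨c, hc⟩ := hd'
    exact ⟨by exact_mod_cast h1, by omega, c - 2, by linarith⟩

lemma pvGood_succ_of_not_prime (m : Nat) (h : ¬ m.Prime) (j : Nat) :
    pvGood (m + 1) j = true ↔ pvGood m j = true := by
  rw [pvGood_iff, pvGood_iff]
  constructor
  · exact fun ⟨h2, hp⟩ => ⟨h2, fun p hlt => hp p (by omega)⟩
  · rintro ⟨h2, hp⟩
    refine ⟨h2, fun p hlt hpp hpd => ?_⟩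
    rcases Nat.lt_or_ge p m with h' | h'
    · exact hp p h' hpp hpd
    · have : p = m := by omega
      subst this
      exact absurd hpp h

lemma pvSieveLoop_getD (k : Nat) : ∀ (m : Nat) (arr : Array Int), 2 ≤ m → m ≤ 1001 →
    1001 - m ≤ k → arr.size = 1000002 →
    (∀ i : Nat, i ≤ 1000000 → arr.getD i 0 = if pvGood m i then 1 else 0) →
    ∀ j : Nat, j ≤ 1000000 →
      (pvSieveLoop arr m).getD j 0 = if pvGood 1001 j then 1 else 0 := by
  induction k with
  | zero =>
    intro m arr hm2 hm hk hsz hinv j hj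
    have hm' : m = 1001 := by omega
    subst hm'
    rw [pvSieveLoop, if_neg (by omega)]
    exact hinv j hj
  | succ k ih =>
    intro m arr hm2 hm hk hsz hinv j hj
    by_cases hms : m * m ≤ 1000000
    · have hm1000 : m ≤ 1000 := by nlinarith
      rw [pvSieveLoop, if_pos hms]
      have hmle : m ≤ 1000000 := by omega
      by_cases hp : pvAGet arr (m : Int) = 1
      · -- sieve[m] = 1: m is prime, its proper multiples get cleared
        rw [if_pos hp]
        have hgm : pvGood m m = true := by
          rw [pvAGet_natCast, hinv m hmle] at hp
          by_contra hng
          rw [if_neg hng] at hp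
          exact absurd hp (by norm_num)
        have hmp : m.Prime := (pvGood_self_iff_prime m hm2).mp hgm
        apply ih (m + 1) _ (by omega) (by omega) (by omega)
          (by rw [pvFold_size]; exact hsz) _ j hj
        intro i hile
        rw [pvFold_getD _ _ _ (by omega)]
        simp only [pvMem_sieve_range m hm2 i]
        by_cases hin : m ∣ i ∧ 2 * m ≤ i ∧ i ≤ 1000000
        · rw [if_pos hin]
          have hni : ¬ pvGood (m + 1) i = true := by
            intro hgt
            obtain ⟨h2, hg⟩ := (pvGood_iff _ _).mp hgt
            have := hg m (by omega) hmp hin.1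
            omega
          rw [if_neg hni]
        · rw [if_neg hin, hinv i hile]
          have hfwd : pvGood m i = true → pvGood (m + 1) i = true := by
            intro hgt
            rw [pvGood_iff] at hgt ⊢
            obtain ⟨h2, hg⟩ := hgt
            refine ⟨h2, fun p hlt hpp hpd => ?_⟩
            rcases Nat.lt_or_ge p m with h' | h'
            · exact hg p h' hpp hpd
            · have hpm : p = m := by omega
              rw [hpm] at hpp hpd ⊢
              by_contra hne
              obtain ⟨c, hc⟩ := hpd
              rcases c with _ | _ | c
              · rw [Nat.mul_zero] at hc; omega
              · rw [Nat.mul_one] at hc; exact hne hc.symm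
              · refine hin ⟨⟨c + 1 + 1, hc⟩, ?_, hile⟩
                have h2m : m * 2 ≤ m * (c + 1 + 1) := Nat.mul_le_mul_left m (by omega)
                omega
          have hbwd : pvGood (m + 1) i = true → pvGood m i = true := by
            intro hgt
            rw [pvGood_iff] at hgt ⊢
            exact ⟨hgt.1, fun p hlt => hgt.2 p (by omega)⟩
          by_cases hgi : pvGood m i = true
          · simp only [if_pos hgi, if_pos (hfwd hgi)]
          · simp only [if_neg hgi, if_neg (fun hg => hgi (hbwd hg))]
      · -- sieve[m] = 0: m is composite, nothing changes
        rw [if_neg hp]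
        have hnm : ¬ m.Prime := by
          intro hmp
          rw [pvAGet_natCast, hinv m hmle,
            if_pos ((pvGood_self_iff_prime m hm2).mpr hmp)] at hp
          exact hp rfl
        apply ih (m + 1) arr (by omega) (by omega) (by omega) hsz _ j hj
        intro i hile
        rw [hinv i hile]
        by_cases hgi : pvGood m i = true
        · simp only [if_pos hgi, if_pos ((pvGood_succ_of_not_prime m hnm i).mpr hgi)]
        · simp only [if_neg hgi,
            if_neg (fun hg => hgi ((pvGood_succ_of_not_prime m hnm i).mp hg))]
    · have hm' : m = 1001 := by nlinarith
      subst hm'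
      rw [pvSieveLoop, if_neg (by omega)]
      exact hinv j hj

lemma pvSieveInit_size : pvSieveInit.size = 1000002 := by
  simp [pvSieveInit]

lemma pvGood_two_iff (i : Nat) : pvGood 2 i = true ↔ 2 ≤ i := by
  rw [pvGood_iff]
  exact ⟨fun h => h.1, fun h => ⟨h, fun p hp hpp _ => absurd hpp.two_le (by omega)⟩⟩

lemma pvSieveInit_getD (i : Nat) (hi : i ≤ 1000000) :
    pvSieveInit.getD i 0 = if pvGood 2 i then 1 else 0 := by
  unfold pvSieveInit
  rcases Nat.lt_or_ge i 2 with h2 | h2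
  · rw [if_neg (fun hg : pvGood 2 i = true => absurd ((pvGood_iff _ _).mp hg).1 (by omega))]
    rw [Array.getD_eq_getD_getElem?, Array.getElem?_append_left (by simpa using h2)]
    simp [h2]
  · rw [if_pos ((pvGood_two_iff i).mpr h2)]
    rw [Array.getD_eq_getD_getElem?, Array.getElem?_append_right (by simpa using h2)]
    simp only [Array.size_replicate, Array.getElem?_replicate]
    rw [if_pos (by omega)]
    rfl

lemma pvSieve_final (j : Nat) (hj : j ≤ 1000000) :
    (pvSieveLoop pvSieveInit 2).getD j 0 = if pvGood 1001 j then 1 else 0 := by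
  exact pvSieveLoop_getD 999 2 pvSieveInit (by omega) (by omega) (by omega)
    pvSieveInit_size (fun i hi => pvSieveInit_getD i hi) j hj

lemma pvIsPrimeAux_iff (x j : Nat) :
    pvIsPrimeAux x j = true ↔ ∀ m, j ≤ m → m * m ≤ x → ¬ m ∣ x := by
  induction j using pvIsPrimeAux.induct x with
  | case1 j hle hmod =>
    rw [pvIsPrimeAux, if_pos hle, if_pos hmod]
    simp only [Bool.false_eq_true, false_iff, not_forall]
    exact ⟨j, le_refl j, hle, not_not_intro (Nat.dvd_of_mod_eq_zero hmod)⟩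
  | case2 j hle hmod ih =>
    rw [pvIsPrimeAux, if_pos hle, if_neg hmod]
    rw [ih]
    constructor
    · intro h m hm hsq
      rcases Nat.eq_or_lt_of_le hm with he | hlt
      · subst he
        intro hd
        obtain ⟨c, rfl⟩ := hd
        exact hmod (Nat.mul_mod_right j c)
      · exact h m (by omega) hsq
    · intro h m hm hsq
      exact h m (by omega) hsq
  | case3 j hle =>
    rw [pvIsPrimeAux, if_neg hle]
    simp only [true_iff]
    intro m hm hsq
    exact absurd (le_trans (Nat.mul_le_mul hm hm) hsq) hle

lemma pvIsPrime_iff (k : Nat) : pvIsPrime (k : Int) = true ↔ k.Prime := by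
  unfold pvIsPrime
  by_cases hk : k < 2
  · rw [if_pos (by exact_mod_cast hk)]
    simp only [Bool.false_eq_true, false_iff]
    exact fun hp => absurd hp.two_le (by omega)
  · rw [if_neg (by exact_mod_cast hk), show ((k : Int)).toNat = k from Int.toNat_natCast k,
      pvIsPrimeAux_iff]
    constructor
    · intro h
      exact Nat.prime_def_le_sqrt.mpr ⟨by omega, fun m h2 hs => h m h2 (Nat.le_sqrt.mp hs)⟩
    · intro hp m hm hsq
      exact (Nat.prime_def_le_sqrt.mp hp).2 m hm (Nat.le_sqrt.mpr hsq)

lemma pvCount_congr (sieve : Array Int) (l : List Int) :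
    (∀ i ∈ l, (pvAGet sieve i = 1 ↔ pvIsPrime i = true)) →
    ∀ cnt n : Int, pvCountA sieve l cnt n = pvCountB l cnt n := by
  induction l with
  | nil => intro _ cnt n; rfl
  | cons x xs ih =>
    intro h cnt n
    have hx := h x (List.mem_cons_self)
    have hrest := fun i hi => h i (List.mem_cons_of_mem x hi)
    simp only [pvCountA, pvCountB]
    by_cases hb : pvIsPrime x = true
    · rw [if_pos (hx.mpr hb), if_pos hb]
      split
      · rfl
      · exact ih hrest (cnt + 1) n
    · rw [if_neg (fun hc => hb (hx.mp hc)), if_neg hb]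
      exact ih hrest cnt n

lemma pvRange_neg_nil (a d : Int) (h1 : d ≤ -1) (h2 : a ≤ 1000001) :
    PySem.List.pyRange a 1000001 d = [] := by
  simp [PySem.List.pyRange, show ¬(d = 0) by omega, show ¬(0 < d) by omega,
    show ¬((1000001 : Int) < a) by omega]

-- ===== VERDICT (by name: the statement is the Claim_ definition above) =====
theorem find_nth_prime_in_sequence_spec : Claim_equal_find_nth_prime_in_sequence := by
  intro a d n _ hpre
  unfold Spec_find_nth_prime_in_sequence
  unfold find_nth_prime_in_sequence find_nth_prime_in_sequence_alt
  rcases hpre with ⟨ha, hd⟩ | ⟨hd, ha⟩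
  · apply pvCount_congr
    intro i hi
    rw [PySem.List.mem_pyRange_iff_of_pos (by omega)] at hi
    obtain ⟨h1, h2, _⟩ := hi
    have h0 : 0 ≤ i := le_trans ha h1
    have hk : i = ((i.toNat : Nat) : Int) := by omega
    rw [hk, pvAGet_natCast, pvSieve_final i.toNat (by omega), pvIsPrime_iff]
    by_cases hg : pvGood 1001 i.toNat = true
    · rw [if_pos hg]
      simp [(pvGood_1001_iff_prime i.toNat (by omega)).mp hg]
    · rw [if_neg hg]
      simp only [show (0 : Int) ≠ 1 by norm_num, false_iff]
      exact fun hpr => hg ((pvGood_1001_iff_prime i.toNat (by omega)).mpr hpr)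
  · rw [pvRange_neg_nil a d hd ha]
    rfl
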